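-- pv_equiv track=rewrite | github.com/Picsou06/PykerGame | compte_points.py | carre
-- ===== SOURCE A (Python) =====
-- def carre(l):
--     """
--     entrée :
--         l liste des valeurs des cartes de L dans lordre croissant
--
--     sortie :
--         un int correspondant au score du joueur s'il possede un full
--     """
--
--     assert type(l) == list, "l'element entrée n'est pas une liste"
--     pts = 0
--     i = len(l) -1
--     while i > 2:
--         if l[i] == l[i-1] == l[i-2] == l[i-3]:
--             pts = 1505 + l[i]
--             i = 0
--         else:
--             i = i-1
--     return pts
-- ===== SOURCE B (Python) =====
-- def carre(l):
--     """
--     entrée :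
--         l liste des valeurs des cartes de L dans lordre croissant
--
--     sortie :
--         un int correspondant au score du joueur s'il possede un full
--     """
--     assert type(l) == list, "l'element entrée n'est pas une liste"
--     pts = 0
--     run_val = 0
--     run_len = 0
--     for x in l:
--         if run_len != 0 and x == run_val:
--             run_len += 1
--         else:
--             run_val = x
--             run_len = 1
--         if run_len == 4:
--             pts = 1505 + x
--     return pts
-- ===== Notes on version B (the rewrite author's own statement) =====
-- stated objective: alternative
-- what changed: Replaces the backward index scan over 4-element windows by a single forward run-length pass that records 1505+value each time a run of equal consecutive elements reaches length 4 (the last such run wins, matching A's rightmost-window scan).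
import Mathlib
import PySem

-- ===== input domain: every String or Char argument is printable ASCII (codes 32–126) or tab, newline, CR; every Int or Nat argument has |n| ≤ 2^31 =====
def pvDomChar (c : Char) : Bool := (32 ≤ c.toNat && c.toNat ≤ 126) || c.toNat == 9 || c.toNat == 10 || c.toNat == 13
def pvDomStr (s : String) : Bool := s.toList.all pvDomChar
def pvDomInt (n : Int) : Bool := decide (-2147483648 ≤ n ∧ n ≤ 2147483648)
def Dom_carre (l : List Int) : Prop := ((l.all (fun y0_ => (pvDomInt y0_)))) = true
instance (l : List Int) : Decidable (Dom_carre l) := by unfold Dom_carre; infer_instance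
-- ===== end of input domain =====

-- B replaces A's backward scan over 4-windows by one forward run-length pass (alternative decomposition, same cost).

-- ===== PORT A =====
-- Python's `while i > 2` loop, descending index.  The loop is entered only with
-- 2 < i ≤ len(l)-1, so every access l[i-k] (k = 0..3) is a nonnegative in-range
-- index; List.getD is therefore exact for Python's l[...] here.
def carreGo (l : List Int) : Nat → Int
  | 0 => 0
  | 1 => 0
  | 2 => 0
  | (i+3) =>
      if l.getD (i+3) 0 = l.getD (i+2) 0 ∧ l.getD (i+2) 0 = l.getD (i+1) 0 ∧
         l.getD (i+1) 0 = l.getD i 0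
      then 1505 + l.getD (i+3) 0          -- pts = 1505 + l[i]; i = 0 exits the loop
      else carreGo l (i+2)                -- i = i - 1

-- i = len(l) - 1 (Nat truncation at 0 is harmless: Python's i = -1 also skips the loop)
def carre (l : List Int) : Int := carreGo l (l.length - 1)

-- ===== PORT B =====
-- state = (pts, run_val, run_len)
def carreStep (s : Int × Int × Int) (x : Int) : Int × Int × Int :=
  let rv := if s.2.2 ≠ 0 ∧ x = s.2.1 then s.2.1 else x
  let rl := if s.2.2 ≠ 0 ∧ x = s.2.1 then s.2.2 + 1 else 1
  (if rl = 4 then 1505 + x else s.1, rv, rl)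

def carre_alt (l : List Int) : Int := (l.foldl carreStep (0, 0, 0)).1

-- ===== PRECONDITION & SPEC =====
def Spec_carre (l : List Int) (out : Int) : Prop := out = carre_alt l
instance (l : List Int) (out : Int) : Decidable (Spec_carre l out) := by unfold Spec_carre; infer_instance

-- ===== CLAIM (what is proved, stated in full; the proofs are below) =====
def Claim_equal_carre : Prop := ∀ (l : List Int), Dom_carre l → Spec_carre l (carre l)

-- ===== LEMMAS AND PROOFS =====

-- carreGo only reads indices ≤ i
lemma carreGo_congr (l₁ l₂ : List Int) (i : Nat)
    (h : ∀ j, j ≤ i → l₁.getD j 0 = l₂.getD j 0) : carreGo l₁ i = carreGo l₂ i := by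
  induction i using Nat.strong_induction_on with
  | _ i ih =>
    match i with
    | 0 => rfl
    | 1 => rfl
    | 2 => rfl
    | (i+3) =>
      simp only [carreGo, h i (by omega), h (i+1) (by omega), h (i+2) (by omega),
        h (i+3) (by omega)]
      split_ifs with hc
      · rfl
      · exact ih (i+2) (by omega) (fun j hj => h j (by omega))

lemma getD_append_lt (l : List Int) (x : Int) (j : Nat) (hj : j < l.length) :
    (l ++ [x]).getD j 0 = l.getD j 0 := by
  simp [List.getD, List.getElem?_append_left hj]

lemma getD_append_self (l : List Int) (x : Int) :
    (l ++ [x]).getD l.length 0 = x := by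
  simp [List.getD]

-- how A's value evolves when one element is appended
lemma carre_concat (l : List Int) (x : Int) :
    carre (l ++ [x]) =
      if 3 ≤ l.length ∧ x = l.getD (l.length - 1) 0 ∧
         l.getD (l.length - 1) 0 = l.getD (l.length - 2) 0 ∧
         l.getD (l.length - 2) 0 = l.getD (l.length - 3) 0
      then 1505 + x else carre l := by
  have hlen : (l ++ [x]).length = l.length + 1 := by simp
  by_cases h3 : 3 ≤ l.length
  · obtain ⟨m, hm⟩ : ∃ m, l.length = m + 3 := ⟨l.length - 3, by omega⟩
    have : carre (l ++ [x]) = carreGo (l ++ [x]) (m + 3) := by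
      unfold carre; rw [hlen, hm, show m+3+1-1 = m+3 from by omega]
    rw [this]
    have e0 : (l ++ [x]).getD (m+3) 0 = x := by
      have := getD_append_self l x; rwa [hm] at this
    have e1 : (l ++ [x]).getD (m+2) 0 = l.getD (l.length - 1) 0 := by
      rw [getD_append_lt l x _ (by omega), hm, show m+3-1 = m+2 from by omega]
    have e2 : (l ++ [x]).getD (m+1) 0 = l.getD (l.length - 2) 0 := by
      rw [getD_append_lt l x _ (by omega), hm, show m+3-2 = m+1 from by omega]
    have e3 : (l ++ [x]).getD m 0 = l.getD (l.length - 3) 0 := by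
      rw [getD_append_lt l x _ (by omega), hm, show m+3-3 = m from by omega]
    simp only [carreGo, e0, e1, e2, e3]
    split_ifs with hc hd hd
    · rfl
    · exact absurd ⟨h3, hc.1, hc.2.1, hc.2.2⟩ hd
    · exact absurd ⟨hd.2.1, hd.2.2.1, hd.2.2.2⟩ hc
    · -- recursive call equals carre l
      have : carreGo (l ++ [x]) (m+2) = carreGo l (m+2) := by
        apply carreGo_congr
        intro j hj
        exact getD_append_lt l x j (by omega)
      rw [this]; unfold carre; rw [hm, show m+3-1 = m+2 from by omega]
  · rw [if_neg (by omega)]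
    unfold carre
    rw [hlen]
    interval_cases h : l.length <;> simp_all [carreGo]

-- the invariant B's fold maintains: pts = carre l, and (run_val, run_len) describe
-- the maximal run of equal elements at the end of l
def InvB (l : List Int) (s : Int × Int × Int) : Prop :=
  s.1 = carre l ∧
  (l = [] → s.2.2 = 0) ∧
  (l ≠ [] → ∃ m : Nat, s.2.2 = (m : Int) ∧ 1 ≤ m ∧ m ≤ l.length ∧
    s.2.1 = l.getD (l.length - 1) 0 ∧
    (∀ k, k < m → l.getD (l.length - 1 - k) 0 = s.2.1) ∧
    (m < l.length → l.getD (l.length - 1 - m) 0 ≠ s.2.1) ∧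
    (4 ≤ m → s.1 = 1505 + s.2.1))

lemma inv_nil : InvB [] (0, 0, 0) := by
  refine ⟨rfl, fun _ => rfl, fun h => absurd rfl h⟩

lemma inv_step (l : List Int) (x : Int) (s : Int × Int × Int) (hs : InvB l s) :
    InvB (l ++ [x]) (carreStep s x) := by
  obtain ⟨hpts, hnil, hcons⟩ := hs
  have hlen : (l ++ [x]).length = l.length + 1 := by simp
  have gx : (l ++ [x]).getD l.length 0 = x := getD_append_self l x
  by_cases hl : l = []
  · -- first element: run restarts at 1
    subst hl
    have h0 : s.2.2 = 0 := hnil rfl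
    refine ⟨?_, by simp, fun _ => ⟨1, ?_⟩⟩
    · simp [carreStep, h0, carre, carreGo, hpts]
    · simp [carreStep, h0]
  · obtain ⟨m, hm, hm1, hmn, hrv, hrun, hmax, h4⟩ := hcons hl
    have hn1 : 0 < l.length := List.length_pos_of_ne_nil hl
    have hcc := carre_concat l x
    by_cases heq : x = s.2.1
    · -- run continues: run_len = m + 1
      have hguard : s.2.2 ≠ 0 ∧ x = s.2.1 := ⟨by rw [hm]; exact_mod_cast by omega, heq⟩
      have hstep : carreStep s x =
          (if (m : Int) + 1 = 4 then 1505 + x else s.1, s.2.1, (m : Int) + 1) := by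
        simp only [carreStep]
        rw [if_pos hguard, if_pos hguard, hm]
      -- when m ≥ 3 the appended element completes a 4-window
      have hW : 3 ≤ m → (3 ≤ l.length ∧ x = l.getD (l.length - 1) 0 ∧
          l.getD (l.length - 1) 0 = l.getD (l.length - 2) 0 ∧
          l.getD (l.length - 2) 0 = l.getD (l.length - 3) 0) := by
        intro h3
        have e1 := hrun 1 (by omega)
        have e2 := hrun 2 (by omega)
        refine ⟨by omega, by rw [heq, hrv], ?_, ?_⟩
        · rw [← hrv, show l.length - 2 = l.length - 1 - 1 by omega, e1]
        · rw [show l.length - 2 = l.length - 1 - 1 by omega, e1,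
              show l.length - 3 = l.length - 1 - 2 by omega, e2]
      -- when m < 3 no new 4-window appears
      have hnW : m < 3 → ¬ (3 ≤ l.length ∧ x = l.getD (l.length - 1) 0 ∧
          l.getD (l.length - 1) 0 = l.getD (l.length - 2) 0 ∧
          l.getD (l.length - 2) 0 = l.getD (l.length - 3) 0) := by
        intro h3 ⟨hL, w1, w2, w3⟩
        have hmlt : m < l.length := by omega
        have hne := hmax hmlt
        rcases Nat.lt_or_ge m 2 with h | h
        · -- m = 1 : l.getD (len-2) = rv via w2
          apply hne
          rw [show m = 1 by omega, show l.length - 1 - 1 = l.length - 2 by omega,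
              ← w2, hrv]
        · -- m = 2 : l.getD (len-3) = rv via w2, w3
          apply hne
          rw [show m = 2 by omega, show l.length - 1 - 2 = l.length - 3 by omega,
              ← w3, ← w2, hrv]
      constructor
      · -- pts component
        rw [hstep]
        by_cases hc : (m : Int) + 1 = 4
        · simp only [if_pos hc]
          rw [hcc, if_pos (hW (by omega))]
        · simp only [if_neg hc]
          rcases Nat.lt_or_ge m 3 with h | h
          · rw [hcc, if_neg (hnW h), hpts]
          · -- m ≥ 4 here: pts is already 1505 + rv
            have h4' : 4 ≤ m := by omega
            rw [hcc, if_pos (hW (by omega)), h4 h4', heq]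
      · refine ⟨by simp, fun _ => ⟨m + 1, ?_, by omega, by omega, ?_, ?_, ?_, ?_⟩⟩
        · rw [hstep]; push_cast; ring
        · rw [hstep]
          simp only [hlen, Nat.add_sub_cancel]
          rw [gx, heq, hrv]
        · intro k hk
          rw [hstep]
          simp only [hlen, Nat.add_sub_cancel]
          match k with
          | 0 => rw [Nat.sub_zero, gx]; exact heq
          | (k+1) =>
            rw [show l.length - (k+1) = l.length - 1 - k by omega,
                getD_append_lt l x _ (by omega)]
            exact hrun k (by omega)
        · intro hlt
          rw [hstep]
          simp only [hlen, Nat.add_sub_cancel]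
          rw [show l.length - (m+1) = l.length - 1 - m by omega,
              getD_append_lt l x _ (by omega)]
          exact hmax (by omega)
        · intro h4'
          rw [hstep]
          by_cases hc : (m : Int) + 1 = 4
          · simp only [if_pos hc]; rw [heq]
          · simp only [if_neg hc]
            exact h4 (by omega)
    · -- run restarts at x with length 1
      have hguard : ¬ (s.2.2 ≠ 0 ∧ x = s.2.1) := by
        intro ⟨_, h⟩; exact heq h
      have hstep : carreStep s x = (s.1, x, 1) := by
        simp only [carreStep, if_neg hguard]
        norm_num
      have hnW : ¬ (3 ≤ l.length ∧ x = l.getD (l.length - 1) 0 ∧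
          l.getD (l.length - 1) 0 = l.getD (l.length - 2) 0 ∧
          l.getD (l.length - 2) 0 = l.getD (l.length - 3) 0) := by
        intro ⟨_, w1, _, _⟩
        exact heq (by rw [w1, ← hrv])
      constructor
      · rw [hstep]
        rw [hcc, if_neg hnW, hpts]
      · refine ⟨by simp, fun _ => ⟨1, ?_, le_refl 1, by omega, ?_, ?_, ?_,
          fun h => absurd h (by omega)⟩⟩
        · rw [hstep]; norm_num
        · rw [hstep]
          simp only [hlen, Nat.add_sub_cancel]
          exact gx.symm
        · intro k hk
          rw [hstep]
          interval_cases k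
          simp only [hlen, Nat.add_sub_cancel, Nat.sub_zero]
          exact gx
        · intro hlt
          rw [hstep]
          simp only [hlen, Nat.add_sub_cancel]
          rw [show l.length - 1 = l.length - 1 - 0 by omega,
              getD_append_lt l x _ (by omega), hrun 0 (by omega)]
          exact fun h => heq h.symm

lemma inv_foldl (l : List Int) : InvB l (l.foldl carreStep (0, 0, 0)) := by
  induction l using List.reverseRecOn with
  | nil => exact inv_nil
  | append_singleton l x ih =>
    rw [List.foldl_append]
    exact inv_step l x _ ih

-- ===== VERDICT (by name: the statement is the Claim_ definition above) =====
theorem carre_spec : Claim_equal_carre := by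
  intro l _
  unfold Spec_carre carre_alt
  exact (inv_foldl l).1.symm
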